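-- pv_equiv track=rewrite | github.com/state-alchemists/zrb | src/zrb/util/string/conversion.py | to_human_case
-- ===== SOURCE A (Python) =====
-- def to_human_case(text: str | None) -> str:
--     text = str(text) if text is not None else ""
--     return " ".join(
--         [
--             x.lower() if x.upper() != x else x
--             for x in _to_space_separated(text).split(" ")
--         ]
--     )
--
-- def _to_space_separated(text: str | None) -> str:
--     text = str(text) if text is not None else ""
--     text = text.replace("-", " ").replace("_", " ")
--     parts = text.split(" ")
--     new_parts = []
--     for part in parts:
--         new_part = ""
--         for char_index, char in enumerate(part):
--             is_first = char_index == 0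
--             is_last = char_index == len(part) - 1
--             previous_char = part[char_index - 1] if not is_first else ""
--             next_char = part[char_index + 1] if not is_last else ""
--             if (
--                 char.isupper()
--                 and char != " "
--                 and (
--                     (not is_last and next_char.islower())
--                     or (not is_first and previous_char.islower())
--                 )
--             ):
--                 new_part += " " + char
--                 continue
--             new_part += char
--         new_part = new_part.strip(" ")
--         if new_part != "":
--             new_parts.append(new_part)
--     return " ".join(new_parts).strip(" ")
-- ===== SOURCE B (Python) =====
-- def to_human_case(text):
--     s = str(text) if text is not None else ""
--     words = _words(s)
--     return " ".join(w if w.upper() == w else w.lower() for w in words)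
--
--
-- def _words(s):
--     # One pass: emit words directly at separators and case boundaries,
--     # instead of inserting spaces, stripping and re-splitting.
--     words = []
--     cur = ""
--     for i, ch in enumerate(s):
--         if ch in "-_ ":
--             if cur:
--                 words.append(cur)
--             cur = ""
--         elif cur and ch.isupper() and (cur[-1].islower() or s[i + 1 : i + 2].islower()):
--             words.append(cur)
--             cur = ch
--         else:
--             cur += ch
--     if cur:
--         words.append(cur)
--     return words
-- ===== Notes on version B (the rewrite author's own statement) =====
-- stated objective: faster
-- what changed: A inserts spaces before boundary uppercase letters inside each part, strips, filters, re-joins and re-splits the string before lowercasing tokens; B makes one direct scan over the characters that emits the words at separators and case boundaries, with no space insertion, stripping or re-splitting.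
import Mathlib
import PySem

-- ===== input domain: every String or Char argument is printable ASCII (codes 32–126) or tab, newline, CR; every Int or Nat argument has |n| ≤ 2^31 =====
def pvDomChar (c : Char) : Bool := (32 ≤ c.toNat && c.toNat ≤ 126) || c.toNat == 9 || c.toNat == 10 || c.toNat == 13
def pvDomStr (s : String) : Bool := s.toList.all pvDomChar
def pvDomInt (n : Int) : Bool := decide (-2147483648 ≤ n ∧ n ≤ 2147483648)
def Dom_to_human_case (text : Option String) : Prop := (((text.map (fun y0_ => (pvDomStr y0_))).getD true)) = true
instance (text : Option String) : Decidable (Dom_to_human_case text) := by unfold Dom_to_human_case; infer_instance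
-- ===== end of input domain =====

-- B replaces A's insert-spaces / strip / re-split pipeline by one direct scan that emits the words
-- (alternative structure, same return value; neither version mutates anything).

-- ===== PORT A =====
-- body of the inner `for char_index, char in enumerate(part)` loop of `_to_space_separated`:
-- the chunk appended to `new_part` for one enumerated character
def innerStep (part : List Char) (ic : Int × Char) : List Char :=
  let char_index : Int := ic.1
  let char : Char := ic.2
  let is_first : Bool := char_index == 0
  let is_last : Bool := char_index == (part.length : Int) - 1
  let previous_char : Option Char := if !is_first then PySem.List.pyGet? part (char_index - 1) else none
  let next_char : Option Char := if !is_last then PySem.List.pyGet? part (char_index + 1) else none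
  if PySem.Chars.isupper char && char != ' ' &&
      ((!is_last && (next_char.map PySem.Chars.islower).getD false) ||
       (!is_first && (previous_char.map PySem.Chars.islower).getD false))
  then [' ', char] else [char]

def innerA (part : List Char) : List Char :=
  (PySem.List.enumerate part).foldl (fun new_part ic => new_part ++ innerStep part ic) []

-- `new_part.strip(" ")`
def npOf (part : List Char) : List Char := PySem.Chars.stripChars (innerA part) [' ']

-- `_to_space_separated`
def toSpaceSeparated (s : List Char) : List Char :=
  let t := PySem.Chars.replace (PySem.Chars.replace s ['-'] [' ']) ['_'] [' ']
  let parts := PySem.Chars.splitOn t [' ']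
  let newParts := parts.foldl (fun acc part =>
      if !(npOf part).isEmpty then acc ++ [npOf part] else acc) []
  PySem.Chars.stripChars (PySem.Chars.join [' '] newParts) [' ']

def to_human_case (text : Option String) : String :=
  let s : List Char := (match text with | some t => t | none => "").toList
  String.ofList (PySem.Chars.join [' ']
    ((PySem.Chars.splitOn (toSpaceSeparated s) [' ']).map
      (fun x => if PySem.Chars.upper x ≠ x then PySem.Chars.lower x else x)))

-- ===== PORT B =====
-- one pass over the characters: emit a word at each separator or case boundary (Source B `_words`)
def wordsAux : List Char → List Char → List (List Char)
  | [], cur => if cur.isEmpty then [] else [cur]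
  | ch :: tail, cur =>
    if ch == '-' || ch == '_' || ch == ' ' then
      (if cur.isEmpty then [] else [cur]) ++ wordsAux tail []
    else if !cur.isEmpty && PySem.Chars.isupper ch &&
            (PySem.Chars.islower (cur.getLastD ' ') ||
             ((tail.head?).map PySem.Chars.islower).getD false) then
      cur :: wordsAux tail [ch]
    else
      wordsAux tail (cur ++ [ch])

def to_human_case_alt (text : Option String) : String :=
  let s : List Char := (match text with | some t => t | none => "").toList
  String.ofList (PySem.Chars.join [' ']
    ((wordsAux s []).map
      (fun w => if PySem.Chars.upper w == w then w else PySem.Chars.lower w)))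

-- ===== PRECONDITION & SPEC =====
def Spec_to_human_case (text : Option String) (out : String) : Prop := out = to_human_case_alt text
instance (text : Option String) (out : String) : Decidable (Spec_to_human_case text out) := by unfold Spec_to_human_case; infer_instance

-- ===== CLAIM (what is proved, stated in full; the proofs are below) =====
def Claim_equal_to_human_case : Prop := ∀ (text : Option String), Dom_to_human_case text → Spec_to_human_case text (to_human_case text)

-- ===== LEMMAS AND PROOFS =====

def isSepB (c : Char) : Bool := c == '-' || c == '_' || c == ' '

def low? (o : Option Char) : Bool := (o.map PySem.Chars.islower).getD false

def condW (prev : Option Char) (c : Char) (nxt : Option Char) : Bool :=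
  PySem.Chars.isupper c && c != ' ' && (low? nxt || low? prev)

-- window-recursion form of A's inner loop
def innerR : Option Char → List Char → List Char
  | _, [] => []
  | prev, c :: rest => (if condW prev c rest.head? then [' ', c] else [c]) ++ innerR (some c) rest

-- clean recursions for `str.split(" ")` and splitting on all three separators
def mySplit : List Char → List Char → List (List Char)
  | pre, [] => [pre]
  | pre, c :: t => if c = ' ' then pre :: mySplit [] t else mySplit (pre ++ [c]) t

def mySplitP : List Char → List Char → List (List Char)
  | pre, [] => [pre]
  | pre, c :: t => if isSepB c then pre :: mySplitP [] t else mySplitP (pre ++ [c]) t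

def replChar (c : Char) : Char := if c = '_' then ' ' else if c = '-' then ' ' else c

def prevOf (part : List Char) (k : Nat) : Option Char := if k = 0 then none else part[k-1]?

-- all word tokens of the input
def toksAll (s : List Char) : List (List Char) :=
  (mySplitP [] s).flatMap (fun q => wordsAux q [])

lemma nonsep_guard {c : Char} (hc : isSepB c = false) :
    (c == '-' || c == '_' || c == ' ') = false := hc

lemma wordsAux_nil (cur : List Char) :
    wordsAux [] cur = if cur.isEmpty then [] else [cur] := rfl

lemma wordsAux_cons_sep {c : Char} (hc : isSepB c = true) (tail cur : List Char) :
    wordsAux (c :: tail) cur = (if cur.isEmpty then [] else [cur]) ++ wordsAux tail [] := by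
  conv_lhs => rw [wordsAux]
  rw [if_pos (show (c == '-' || c == '_' || c == ' ') = true from hc)]

lemma wordsAux_cons_nonsep {c : Char} (hc : isSepB c = false) (tail cur : List Char) :
    wordsAux (c :: tail) cur =
      if (!cur.isEmpty && PySem.Chars.isupper c &&
          (PySem.Chars.islower (cur.getLastD ' ') ||
           ((tail.head?).map PySem.Chars.islower).getD false)) = true
      then cur :: wordsAux tail [c] else wordsAux tail (cur ++ [c]) := by
  conv_lhs => rw [wordsAux]
  rw [if_neg (by rw [nonsep_guard hc]; exact Bool.false_ne_true)]

-- ---- fuel-program reductions ----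
lemma replace_go_single (a b : Char) :
    ∀ (l : List Char) (fuel : Nat) (acc : List Char), l.length ≤ fuel →
      PySem.Chars.replace.go [a] [b] fuel l acc
        = acc.reverse ++ l.map (fun c => if c = a then b else c) := by
  intro l
  induction l with
  | nil => intro fuel acc h; cases fuel <;> simp [PySem.Chars.replace.go]
  | cons c t ih =>
    intro fuel acc h
    cases fuel with
    | zero => simp at h
    | succ f =>
      rw [PySem.Chars.replace.go]
      by_cases hc : c = a
      · simp only [List.isPrefixOf, hc, BEq.rfl, Bool.true_and, if_true, List.length_cons,
          List.length_nil, List.drop_succ_cons, List.drop_zero]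
        rw [ih f _ (by simpa using h)]
        simp
      · have hp : [a].isPrefixOf (c :: t) = false := by
          simp [List.isPrefixOf]
          exact fun h' => absurd h' (by simpa [eq_comm] using hc)
        simp only [hp, Bool.false_eq_true, if_false]
        rw [ih f _ (by simpa using h)]
        simp [hc]

lemma replace_single (s : List Char) (a b : Char) :
    PySem.Chars.replace s [a] [b] = s.map (fun c => if c = a then b else c) := by
  rw [PySem.Chars.replace]
  simpa using replace_go_single a b s s.length [] (le_refl _)

lemma splitOn_go_eq :
    ∀ (l : List Char) (fuel : Nat) (cur : List Char) (acc : List (List Char)), l.length ≤ fuel →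
      PySem.Chars.splitOn.go [' '] (fuel + 1) l cur acc
        = acc.reverse ++ mySplit cur.reverse l := by
  intro l
  induction l with
  | nil => intro fuel cur acc h; simp [PySem.Chars.splitOn.go, mySplit]
  | cons c t ih =>
    intro fuel cur acc h
    cases fuel with
    | zero => simp at h
    | succ f =>
      rw [PySem.Chars.splitOn.go]
      by_cases hc : c = ' '
      · have hp : [' '].isPrefixOf (c :: t) = true := by simp [List.isPrefixOf, hc]
        simp only [hp, if_true, List.length_cons, List.length_nil, List.drop_succ_cons, List.drop_zero]
        rw [ih f _ _ (by simpa using h)]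
        simp [mySplit, hc]
      · have hp : [' '].isPrefixOf (c :: t) = false := by
          simp [List.isPrefixOf]
          exact fun h' => absurd h' (by simpa [eq_comm] using hc)
        simp only [hp, Bool.false_eq_true, if_false]
        rw [ih f _ _ (by simpa using h)]
        simp [mySplit, hc]

lemma splitOn_eq (s : List Char) : PySem.Chars.splitOn s [' '] = mySplit [] s := by
  rw [PySem.Chars.splitOn]
  rw [splitOn_go_eq s s.length [] [] (le_refl _)]
  simp

-- ---- innerA = innerR ----
lemma innerStep_eq (part : List Char) (t' : List Char) (k : Nat) (c : Char)
    (h : part.drop k = c :: t') :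
    innerStep part ((k : Int), c) = (if condW (prevOf part k) c t'.head? then [' ', c] else [c]) := by
  have hk : k < part.length := by
    by_contra hge
    rw [List.drop_eq_nil_of_le (by omega)] at h
    exact absurd h (by simp)
  have hget : part[k]? = some c := by
    rw [← List.head?_drop, h]; rfl
  have hdrop : part.drop (k+1) = t' := by
    have h2 : part.drop (k+1) = (part.drop k).drop 1 := by rw [List.drop_drop]
    rw [h2, h]; simp
  have hnext : part[k+1]? = t'.head? := by
    rw [← List.head?_drop, hdrop]
  have hlen : part.length = k + 1 + t'.length := by
    have := congrArg List.length h
    simp at this; omega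
  rw [innerStep]
  have hfirst : ((k : Int) == 0) = decide (k = 0) := by
    rcases Nat.eq_zero_or_pos k with h0 | h0
    · subst h0; simp
    · have h1 : (k : Int) ≠ 0 := by exact_mod_cast Nat.pos_iff_ne_zero.mp h0
      simp [beq_eq_false_iff_ne, Nat.pos_iff_ne_zero.mp h0]
  have hlast : ((k : Int) == (part.length : Int) - 1) = decide (t' = []) := by
    rcases t' with _ | ⟨d, t''⟩
    · have h1 : (k : Int) = (part.length : Int) - 1 := by rw [hlen]; simp
      simp [h1]
    · have h1 : (k : Int) ≠ (part.length : Int) - 1 := by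
        have h2 := hlen; simp at h2; omega
      simp [h1, beq_eq_false_iff_ne]
  simp only [hfirst, hlast]
  by_cases h0 : k = 0
  · subst h0
    rcases t' with _ | ⟨d, t''⟩
    · simp [condW, low?, prevOf]
    · have hnextget : PySem.List.pyGet? part (1:Int) = some d := by
        rw [show (1:Int) = ((1:Nat):Int) by norm_num, PySem.List.pyGet?_natCast]
        simpa using hnext
      simp [condW, low?, prevOf, hnextget]
  · have hk1 : ((k:Int) - 1) = ((k-1 : Nat) : Int) := by omega
    have hprevget : PySem.List.pyGet? part ((k:Int) - 1) = part[k-1]? := by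
      rw [hk1, PySem.List.pyGet?_natCast]
    rcases t' with _ | ⟨d, t''⟩
    · simp [h0, condW, low?, prevOf, hprevget]
    · have hnextget : PySem.List.pyGet? part ((k:Int) + 1) = some d := by
        rw [show ((k:Int) + 1) = ((k+1:Nat):Int) by push_cast; ring, PySem.List.pyGet?_natCast, hnext]
        rfl
      simp [h0, condW, low?, prevOf, hprevget, hnextget]

lemma innerA_aux (part : List Char) :
    ∀ (t : List Char) (k : Nat), part.drop k = t →
    (PySem.List.enumerate t (k : Int)).flatMap (innerStep part) = innerR (prevOf part k) t := by
  intro t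
  induction t with
  | nil => intro k h; simp [PySem.List.enumerate, innerR]
  | cons c t' ih =>
    intro k h
    have hdrop : part.drop (k+1) = t' := by
      have h2 : part.drop (k+1) = (part.drop k).drop 1 := by rw [List.drop_drop]
      rw [h2, h]; simp
    have hget : part[k]? = some c := by
      rw [← List.head?_drop, h]; rfl
    rw [PySem.List.enumerate_cons, List.flatMap_cons]
    rw [show ((k : Int) + 1) = ((k+1 : Nat) : Int) by push_cast; ring, ih (k+1) hdrop]
    rw [innerStep_eq part t' k c h]
    have hprev : prevOf part (k+1) = some c := by simp [prevOf, hget]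
    rw [hprev, innerR]

lemma innerA_eq (part : List Char) : innerA part = innerR none part := by
  rw [innerA, PySem.List.foldl_append_eq_flatMap]
  have := innerA_aux part part 0 (by simp)
  simpa [prevOf] using this

-- ---- token facts ----
lemma wordsAux_mem_ne_nil (q : List Char) : ∀ cur, ∀ w ∈ wordsAux q cur, w ≠ [] := by
  induction q with
  | nil =>
    intro cur w hw; rw [wordsAux] at hw; split at hw
    · simp_all
    · rename_i hcur; simp at hw; subst hw; simpa using hcur
  | cons ch tail ih =>
    intro cur w hw
    rw [wordsAux] at hw
    split at hw
    · rcases List.mem_append.mp hw with h | h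
      · split at h
        · simp_all
        · rename_i hcur; simp at h; subst h; simpa using hcur
      · exact ih [] w h
    · split at hw
      · rcases List.mem_cons.mp hw with rfl | h
        · rename_i hcond; intro he; subst he; simp_all
        · exact ih [ch] w h
      · exact ih (cur ++ [ch]) w hw

lemma wordsAux_mem_nosep (q : List Char) : ∀ cur, (∀ c ∈ q, isSepB c = false) →
    (∀ c ∈ cur, isSepB c = false) →
    ∀ w ∈ wordsAux q cur, ∀ c ∈ w, isSepB c = false := by
  induction q with
  | nil =>
    intro cur _ hc w hw
    rw [wordsAux] at hw; split at hw <;> simp_all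
  | cons ch tail ih =>
    intro cur hq hc w hw
    have hch : isSepB ch = false := hq ch (by simp)
    have htl : ∀ c ∈ tail, isSepB c = false := fun c hcm => hq c (by simp [hcm])
    rw [wordsAux] at hw
    split at hw
    · rename_i hs; rw [isSepB] at hch; simp_all
    · split at hw
      · rcases List.mem_cons.mp hw with rfl | h
        · exact hc
        · exact ih [ch] htl (by simpa using hch) w h
      · refine ih (cur ++ [ch]) htl ?_ w hw
        intro c hcm
        rcases List.mem_append.mp hcm with h | h
        · exact hc c h
        · simp at h; subst h; exact hch

lemma wordsAux_ne_nil (q : List Char) : ∀ cur, cur ≠ [] → wordsAux q cur ≠ [] := by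
  induction q with
  | nil => intro cur h; rw [wordsAux]; simp [h]
  | cons ch tail ih =>
    intro cur h
    rw [wordsAux]
    split
    · simp [h]
    · split
      · simp
      · exact ih (cur ++ [ch]) (by simp)

-- ---- intercalate / strip helpers ----
lemma interc_cons (s : List Char) (x : List Char) (xs : List (List Char)) :
    List.intercalate s (x :: xs) = x ++ (if xs = [] then [] else s ++ List.intercalate s xs) := by
  cases xs <;> simp [List.intercalate, List.intersperse]

lemma interc_append (s : List Char) (as bs : List (List Char)) (ha : as ≠ []) (hb : bs ≠ []) :
    List.intercalate s (as ++ bs) = List.intercalate s as ++ s ++ List.intercalate s bs := by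
  induction as with
  | nil => simp_all
  | cons a as ih =>
    rcases as with _ | ⟨a2, as'⟩
    · rcases bs with _ | ⟨b, bs'⟩
      · simp_all
      · rw [List.singleton_append, interc_cons, interc_cons s a []]
        simp
    · rw [List.cons_append, interc_cons, interc_cons s a (a2 :: as')]
      rw [ih (by simp)]
      simp

lemma stripId (X : List Char) (h1 : X.head? ≠ some ' ') (h2 : X.getLast? ≠ some ' ') :
    PySem.Chars.stripChars X [' '] = X := by
  rw [PySem.Chars.stripChars]
  have hd : List.dropWhile (fun c => [' '].contains c) X = X := by
    cases X with
    | nil => rfl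
    | cons a t =>
      have ha : a ≠ ' ' := by intro he; exact h1 (by simp [he])
      simp [ha]
  rw [hd]
  have hr : List.dropWhile (fun c => [' '].contains c) X.reverse = X.reverse := by
    cases hX : X.reverse with
    | nil => rfl
    | cons a t =>
      have ha : X.getLast? = some a := by rw [← List.head?_reverse, hX]; rfl
      have : a ≠ ' ' := fun he => h2 (he ▸ ha)
      simp [this]
  rw [hr, List.reverse_reverse]

lemma interc_head (toks : List (List Char)) (hne : ∀ w ∈ toks, w ≠ [])
    (hns : ∀ w ∈ toks, ∀ c ∈ w, c ≠ ' ') :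
    (List.intercalate [' '] toks).head? ≠ some ' ' := by
  cases toks with
  | nil => simp [List.intercalate]
  | cons t rest =>
    rw [interc_cons]
    have ht : t ≠ [] := hne t (by simp)
    cases t with
    | nil => simp_all
    | cons a t' =>
      simp only [List.cons_append, List.head?_cons]
      intro he
      rw [Option.some.injEq] at he
      subst he
      exact hns (' ' :: t') List.mem_cons_self ' ' List.mem_cons_self rfl

lemma interc_ne_nil (toks : List (List Char)) (h : toks ≠ []) (hne : ∀ w ∈ toks, w ≠ []) :
    List.intercalate [' '] toks ≠ [] := by
  cases toks with
  | nil => simp_all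
  | cons t rest =>
    rw [interc_cons]
    have := hne t (by simp)
    cases t <;> simp_all

lemma interc_last (toks : List (List Char)) (hne : ∀ w ∈ toks, w ≠ [])
    (hns : ∀ w ∈ toks, ∀ c ∈ w, c ≠ ' ') :
    (List.intercalate [' '] toks).getLast? ≠ some ' ' := by
  induction toks with
  | nil => simp [List.intercalate]
  | cons t rest ih =>
    rcases rest with _ | ⟨u, rest'⟩
    · rw [interc_cons, if_pos rfl, List.append_nil]
      intro he
      exact hns t (by simp) ' ' (List.mem_of_mem_getLast? he) rfl
    · rw [interc_cons, if_neg (by simp : ¬(u :: rest' = []))]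
      have hx : List.intercalate [' '] (u :: rest') ≠ [] :=
        interc_ne_nil _ (by simp) (fun w hw => hne w (by simp [hw]))
      rw [List.getLast?_append_of_ne_nil _ (by simp : ([' '] ++ List.intercalate [' '] (u :: rest')) ≠ [])]
      rw [List.getLast?_append_of_ne_nil _ hx]
      exact ih (fun w hw => hne w (by simp [hw])) (fun w hw => hns w (by simp [hw]))

lemma strip_interc (toks : List (List Char)) (hne : ∀ w ∈ toks, w ≠ [])
    (hns : ∀ w ∈ toks, ∀ c ∈ w, c ≠ ' ') :
    PySem.Chars.stripChars (List.intercalate [' '] toks) [' '] = List.intercalate [' '] toks :=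
  stripId _ (interc_head toks hne hns) (interc_last toks hne hns)

lemma strip_cons_space (X : List Char) :
    PySem.Chars.stripChars (' ' :: X) [' '] = PySem.Chars.stripChars X [' '] := by
  rw [PySem.Chars.stripChars, PySem.Chars.stripChars]
  simp

-- ---- mySplit facts ----
lemma mySplit_sepfree (q : List Char) : (∀ c ∈ q, c ≠ ' ') → ∀ pre, mySplit pre q = [pre ++ q] := by
  induction q with
  | nil => intro _ pre; simp [mySplit]
  | cons c t ih =>
    intro hq pre
    rw [mySplit, if_neg (hq c (by simp))]
    rw [ih (fun d hd => hq d (by simp [hd])) (pre ++ [c])]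
    simp

lemma mySplit_append (q : List Char) : (∀ c ∈ q, c ≠ ' ') → ∀ pre r,
    mySplit pre (q ++ ' ' :: r) = (pre ++ q) :: mySplit [] r := by
  induction q with
  | nil => intro _ pre r; simp [mySplit]
  | cons c t ih =>
    intro hq pre r
    rw [List.cons_append, mySplit, if_neg (hq c (by simp))]
    rw [ih (fun d hd => hq d (by simp [hd])) (pre ++ [c]) r]
    simp

lemma mySplit_interc (toks : List (List Char)) (h : toks ≠ [])
    (hns : ∀ w ∈ toks, ∀ c ∈ w, c ≠ ' ') :
    mySplit [] (List.intercalate [' '] toks) = toks := by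
  induction toks with
  | nil => simp_all
  | cons t rest ih =>
    rcases rest with _ | ⟨u, rest'⟩
    · rw [interc_cons, if_pos rfl, List.append_nil]
      rw [mySplit_sepfree t (hns t (by simp)) []]
      simp
    · rw [interc_cons, if_neg (by simp : ¬(u :: rest' = []))]
      have : t ++ ([' '] ++ List.intercalate [' '] (u :: rest'))
           = t ++ ' ' :: List.intercalate [' '] (u :: rest') := by simp
      rw [this, mySplit_append t (hns t (by simp)) [] _]
      rw [ih (by simp) (fun w hw => hns w (by simp [hw]))]
      simp

lemma join_flat (L : List (List (List Char))) :
    List.intercalate [' '] ((L.filter (· ≠ [])).map (List.intercalate [' ']))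
      = List.intercalate [' '] L.flatten := by
  induction L with
  | nil => simp
  | cons tl L' ih =>
    by_cases htl : tl = []
    · subst htl; simpa using ih
    · rw [List.filter_cons_of_pos (by simpa using htl), List.map_cons, List.flatten_cons]
      by_cases hfl : L'.flatten = []
      · have hfilter : L'.filter (· ≠ []) = [] := by
          rw [List.filter_eq_nil_iff]
          intro a ha
          have := List.flatten_eq_nil_iff.mp hfl a ha
          simp [this]
        rw [hfilter, hfl]
        rw [List.map_nil, interc_cons, if_pos rfl, List.append_nil]
        simp
      · have hfilter : (L'.filter (· ≠ [])).map (List.intercalate [' ']) ≠ [] := by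
          simp only [ne_eq, List.map_eq_nil_iff, List.filter_eq_nil_iff]
          intro hall
          apply hfl
          rw [List.flatten_eq_nil_iff]
          intro a ha
          have := hall a ha
          simpa using this
        rw [interc_cons, if_neg hfilter, ih]
        rw [interc_append [' '] tl L'.flatten htl hfl]
        simp

-- ---- separator characters ----
lemma sep_not_lower {c : Char} (hc : isSepB c = true) : PySem.Chars.islower c = false := by
  rw [isSepB] at hc
  rcases Bool.or_eq_true_iff.mp hc with h | h
  · rcases Bool.or_eq_true_iff.mp h with h' | h'
    · rw [beq_iff_eq.mp h']; decide
    · rw [beq_iff_eq.mp h']; decide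
  · rw [beq_iff_eq.mp h]; decide

lemma nonsep_ne_space {c : Char} (hc : isSepB c = false) : c ≠ ' ' := by
  intro he; subst he; simp [isSepB] at hc

lemma replChar_sep {c : Char} (hc : isSepB c = true) : replChar c = ' ' := by
  rw [isSepB] at hc
  rcases Bool.or_eq_true_iff.mp hc with h | h
  · rcases Bool.or_eq_true_iff.mp h with h' | h'
    · rw [beq_iff_eq.mp h']; decide
    · rw [beq_iff_eq.mp h']; decide
  · rw [beq_iff_eq.mp h]; decide

lemma replChar_nonsep {c : Char} (hc : isSepB c = false) : replChar c = c := by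
  rw [isSepB] at hc
  simp only [Bool.or_eq_false_iff, beq_eq_false_iff_ne] at hc
  rw [replChar, if_neg hc.1.2, if_neg hc.1.1]

-- ---- splitting equivalences ----
lemma mySplit_map_repl (s : List Char) : ∀ pre, mySplit pre (s.map replChar) = mySplitP pre s := by
  induction s with
  | nil => intro pre; simp [mySplit, mySplitP]
  | cons c t ih =>
    intro pre
    rw [List.map_cons, mySplit, mySplitP]
    by_cases hc : isSepB c = true
    · rw [if_pos (replChar_sep hc), if_pos hc, ih]
    · have hc' : isSepB c = false := by simpa using hc
      rw [replChar_nonsep hc']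
      rw [if_neg (nonsep_ne_space hc'), if_neg (by simp [hc']), ih]

lemma mySplitP_parts_nosep (s : List Char) : ∀ pre, (∀ c ∈ pre, isSepB c = false) →
    ∀ q ∈ mySplitP pre s, ∀ c ∈ q, isSepB c = false := by
  induction s with
  | nil => intro pre hpre q hq; rw [mySplitP] at hq; simp at hq; subst hq; exact hpre
  | cons c t ih =>
    intro pre hpre q hq
    rw [mySplitP] at hq
    split at hq
    · rcases List.mem_cons.mp hq with rfl | h
      · exact hpre
      · exact ih [] (by simp) q h
    · rename_i hc
      refine ih (pre ++ [c]) ?_ q hq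
      intro d hd
      rcases List.mem_append.mp hd with h | h
      · exact hpre d h
      · simp at h; subst h; simpa using hc

lemma mySplitP_ne_nil (s : List Char) : ∀ pre, mySplitP pre s ≠ [] := by
  induction s with
  | nil => intro pre; simp [mySplitP]
  | cons c t ih =>
    intro pre
    rw [mySplitP]
    split
    · simp
    · exact ih (pre ++ [c])

lemma mySplitP_pre (s : List Char) : ∀ pre,
    mySplitP pre s = (pre ++ (mySplitP [] s).headI) :: (mySplitP [] s).tail := by
  induction s with
  | nil => intro pre; simp [mySplitP]
  | cons c t ih =>
    intro pre
    by_cases hc : isSepB c = true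
    · rw [mySplitP, if_pos hc, mySplitP, if_pos hc]
      simp
    · have hc' : ¬ (isSepB c = true) := hc
      rw [mySplitP, if_neg hc', ih (pre ++ [c])]
      rw [show mySplitP [] (c :: t) = mySplitP [c] t by rw [mySplitP, if_neg hc']; simp]
      rw [ih [c]]
      simp

-- ---- per-part equivalence ----
lemma innerR_cur (q : List Char) : ∀ (cur : List Char), cur ≠ [] →
    (∀ c ∈ q, isSepB c = false) → (∀ c ∈ cur, isSepB c = false) →
    cur ++ innerR (some (cur.getLastD ' ')) q = List.intercalate [' '] (wordsAux q cur) := by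
  induction q with
  | nil =>
    intro cur hcur _ _
    rw [wordsAux_nil, if_neg (by simpa using hcur)]
    rw [interc_cons, if_pos rfl]
    simp [innerR]
  | cons c t ih =>
    intro cur hcur hq hc
    have hcns : isSepB c = false := hq c (by simp)
    have htl : ∀ d ∈ t, isSepB d = false := fun d hd => hq d (by simp [hd])
    rw [innerR, wordsAux_cons_nonsep hcns]
    have hcond : condW (some (cur.getLastD ' ')) c t.head?
        = (!cur.isEmpty && PySem.Chars.isupper c &&
            (PySem.Chars.islower (cur.getLastD ' ') ||
             ((t.head?).map PySem.Chars.islower).getD false)) := by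
      rw [condW, low?, low?]
      have h1 : (!cur.isEmpty) = true := by simpa using hcur
      have h2 : (c != ' ') = true := by simpa using nonsep_ne_space hcns
      rw [h1, h2]
      simp [Bool.or_comm]
    rw [hcond]
    by_cases hb : (!cur.isEmpty && PySem.Chars.isupper c &&
            (PySem.Chars.islower (cur.getLastD ' ') ||
             ((t.head?).map PySem.Chars.islower).getD false)) = true
    · rw [if_pos hb, if_pos hb]
      rw [interc_cons, if_neg (wordsAux_ne_nil t [c] (by simp))]
      have := ih [c] (by simp) htl (by simpa using hcns)
      simp only [show ([c].getLastD ' ') = c from rfl] at this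
      rw [← this]
      simp
    · rw [if_neg hb, if_neg hb]
      have := ih (cur ++ [c]) (by simp) htl (by
        intro d hd
        rcases List.mem_append.mp hd with h | h
        · exact hc d h
        · simp at h; subst h; exact hcns)
      rw [← this]
      simp

lemma part_eq (q : List Char) (hq : ∀ c ∈ q, isSepB c = false) :
    PySem.Chars.stripChars (innerR none q) [' '] = List.intercalate [' '] (wordsAux q []) := by
  cases q with
  | nil => simp [innerR, wordsAux_nil, List.intercalate, PySem.Chars.stripChars]
  | cons c t =>
    have hcns : isSepB c = false := hq c (by simp)
    have htl : ∀ d ∈ t, isSepB d = false := fun d hd => hq d (by simp [hd])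
    have hX : [c] ++ innerR (some c) t = List.intercalate [' '] (wordsAux t [c]) := by
      have := innerR_cur t [c] (by simp) htl (by simpa using hcns)
      simpa using this
    have htoksne : ∀ w ∈ wordsAux t [c], w ≠ [] := wordsAux_mem_ne_nil t [c]
    have htoksns : ∀ w ∈ wordsAux t [c], ∀ d ∈ w, d ≠ ' ' := by
      intro w hw d hd
      exact nonsep_ne_space (wordsAux_mem_nosep t [c] htl (by simpa using hcns) w hw d hd)
    have hwq : wordsAux (c :: t) [] = wordsAux t [c] := by
      rw [wordsAux_cons_nonsep hcns]
      rw [if_neg (by simp)]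
      simp
    rw [innerR, hwq]
    by_cases hb : condW none c t.head? = true
    · rw [if_pos hb]
      rw [show ([' ', c] ++ innerR (some c) t : List Char)
            = ' ' :: ([c] ++ innerR (some c) t) by simp]
      rw [strip_cons_space, hX, strip_interc _ htoksne htoksns]
    · rw [if_neg hb]
      rw [hX, strip_interc _ htoksne htoksns]

-- ---- B decomposition ----
lemma wordsAux_decomp (s : List Char) : ∀ (cur : List Char),
    wordsAux s cur = wordsAux ((mySplitP [] s).headI) cur
      ++ ((mySplitP [] s).tail).flatMap (fun q => wordsAux q []) := by
  induction s with
  | nil => intro cur; simp [mySplitP]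
  | cons c t ih =>
    intro cur
    by_cases hcsep : isSepB c = true
    · rw [show mySplitP [] (c :: t) = [] :: mySplitP [] t by rw [mySplitP, if_pos hcsep]]
      simp only [List.headI_cons, List.tail_cons]
      rw [wordsAux_cons_sep hcsep, ih []]
      rw [wordsAux_nil]
      cases hPt : mySplitP [] t with
      | nil => exact absurd hPt (mySplitP_ne_nil t [])
      | cons p0 ps =>
        simp
    · have hc'' : isSepB c = false := by simpa using hcsep
      rw [show mySplitP [] (c :: t) = mySplitP [c] t by rw [mySplitP, if_neg hcsep]; simp]
      rw [mySplitP_pre t [c]]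
      simp only [List.headI_cons, List.tail_cons, List.singleton_append]
      have hlow : ((t.head?).map PySem.Chars.islower).getD false
          = (((mySplitP [] t).headI.head?).map PySem.Chars.islower).getD false := by
        cases t with
        | nil => simp [mySplitP]
        | cons d t' =>
          by_cases hd : isSepB d = true
          · rw [show mySplitP [] (d :: t') = [] :: mySplitP [] t' by rw [mySplitP, if_pos hd]]
            simp [sep_not_lower hd]
          · rw [show mySplitP [] (d :: t') = mySplitP [d] t' by rw [mySplitP, if_neg hd]; simp]
            rw [mySplitP_pre t' [d]]
            simp
      rw [wordsAux_cons_nonsep hc'' t cur, wordsAux_cons_nonsep hc'' ((mySplitP [] t).headI) cur]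
      conv_lhs => rw [hlow]
      split
      · rw [ih [c]]
        simp
      · rw [ih (cur ++ [c])]

lemma wordsAux_eq_toksAll (s : List Char) : wordsAux s [] = toksAll s := by
  rw [toksAll, wordsAux_decomp s []]
  cases hPt : mySplitP [] s with
  | nil => exact absurd hPt (mySplitP_ne_nil s [])
  | cons p0 ps => simp

-- ---- A pipeline characterisation ----
lemma toksAll_facts (s : List Char) :
    (∀ w ∈ toksAll s, w ≠ []) ∧ (∀ w ∈ toksAll s, ∀ c ∈ w, c ≠ ' ') := by
  constructor
  · intro w hw
    rw [toksAll, List.mem_flatMap] at hw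
    obtain ⟨q, _, hwq⟩ := hw
    exact wordsAux_mem_ne_nil q [] w hwq
  · intro w hw c hc
    rw [toksAll, List.mem_flatMap] at hw
    obtain ⟨q, hq, hwq⟩ := hw
    have hqs := mySplitP_parts_nosep s [] (by simp) q hq
    exact nonsep_ne_space (wordsAux_mem_nosep q [] hqs (by simp) w hwq c hc)

lemma tss_eq (s : List Char) : toSpaceSeparated s = List.intercalate [' '] (toksAll s) := by
  rw [toSpaceSeparated]
  have hrepl : PySem.Chars.replace (PySem.Chars.replace s ['-'] [' ']) ['_'] [' ']
      = s.map replChar := by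
    rw [replace_single, replace_single, List.map_map]
    apply List.map_congr_left
    intro c _
    by_cases h1 : c = '-'
    · subst h1; rfl
    · by_cases h2 : c = '_'
      · subst h2; rfl
      · simp [Function.comp, h1, h2, replChar]
  rw [hrepl, splitOn_eq, mySplit_map_repl s []]
  have hparts_nosep := mySplitP_parts_nosep s [] (by simp)
  rw [PySem.List.foldl_append_if (fun part => !(npOf part).isEmpty) npOf (mySplitP [] s) []]
  rw [List.nil_append]
  have hmap : ((mySplitP [] s).filter (fun part => !(npOf part).isEmpty)).map npOf
      = (((mySplitP [] s).map (fun q => wordsAux q [])).filter (· ≠ [])).map (List.intercalate [' ']) := by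
    have hnp : ∀ q ∈ mySplitP [] s, npOf q = List.intercalate [' '] (wordsAux q []) := by
      intro q hq
      rw [npOf, innerA_eq, part_eq q (hparts_nosep q hq)]
    rw [List.filter_map]
    have hfil : (mySplitP [] s).filter (fun part => !(npOf part).isEmpty)
        = (mySplitP [] s).filter ((fun x => decide (x ≠ [])) ∘ (fun q => wordsAux q [])) := by
      apply List.filter_congr
      intro q hq
      rw [hnp q hq]
      simp only [Function.comp]
      by_cases hw : wordsAux q [] = []
      · simp [hw, List.intercalate]
      · have : List.intercalate [' '] (wordsAux q []) ≠ [] :=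
          interc_ne_nil _ hw (wordsAux_mem_ne_nil q [])
        simp [hw, this]
    rw [hfil, List.map_map]
    apply List.map_congr_left
    intro q hq
    exact hnp q (List.mem_of_mem_filter hq)
  rw [PySem.Chars.join, hmap, join_flat]
  rw [← List.flatMap_def]
  rw [show ((mySplitP [] s).flatMap fun q => wordsAux q []) = toksAll s from rfl]
  exact strip_interc _ (toksAll_facts s).1 (toksAll_facts s).2

lemma rule_eq (x : List Char) :
    (if PySem.Chars.upper x ≠ x then PySem.Chars.lower x else x)
      = (if PySem.Chars.upper x == x then x else PySem.Chars.lower x) := by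
  by_cases h : PySem.Chars.upper x = x
  · simp [h]
  · simp [h]

lemma main_eq (s : List Char) :
    PySem.Chars.join [' ']
      ((PySem.Chars.splitOn (toSpaceSeparated s) [' ']).map
        (fun x => if PySem.Chars.upper x ≠ x then PySem.Chars.lower x else x))
    = PySem.Chars.join [' ']
      ((wordsAux s []).map (fun w => if PySem.Chars.upper w == w then w else PySem.Chars.lower w)) := by
  rw [tss_eq, splitOn_eq, wordsAux_eq_toksAll]
  by_cases h : toksAll s = []
  · rw [h]
    simp [List.intercalate, mySplit, PySem.Chars.join, PySem.Chars.upper]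
  · rw [mySplit_interc (toksAll s) h (toksAll_facts s).2]
    rw [PySem.Chars.join, PySem.Chars.join]
    congr 1
    apply List.map_congr_left
    intro x _
    exact rule_eq x

-- ===== VERDICT (by name: the statement is the Claim_ definition above) =====
theorem to_human_case_spec : Claim_equal_to_human_case := by
  intro text _
  unfold Spec_to_human_case to_human_case to_human_case_alt
  exact congrArg String.ofList (main_eq _)
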